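-- pv_equiv track=rewrite | github.com/bodino/CSE415 | assignment1/a1.py | perfect_shuffle
-- ===== SOURCE A (Python) =====
-- def perfect_shuffle(even_list):
--     split1 = even_list[0:int(len(even_list)/2)]
--     split2 = even_list[int(len(even_list)/2):]
--     new_list = []
--     for i in range(len(split1)):
--         new_list.append(split1[i])
--         new_list.append(split2[i])
--     return new_list
--
--     """Assume even_list is a list of an even number of elements.
--     Return a new list that is the perfect-shuffle of the input.
--     Perfect shuffle means splitting a list into two halves and then interleaving
--     them. For example, the perfect shuffle of [0, 1, 2, 3, 4, 5, 6, 7] is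
--     [0, 4, 1, 5, 2, 6, 3, 7]."""
-- ===== SOURCE B (Python) =====
-- def perfect_shuffle(even_list):
--     h = len(even_list) // 2
--     return [even_list[(k % 2) * h + k // 2] for k in range(2 * h)]
-- ===== Notes on version B (the rewrite author's own statement) =====
-- stated objective: alternative
-- what changed: Instead of splitting the list into two halves and appending one element from each per loop iteration, B builds the output position-by-position: element k of the result is even_list[(k % 2) * h + k // 2], a closed-form index map over output positions 0..2h-1, with no slicing and no pair-wise appends.
import Mathlib
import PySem

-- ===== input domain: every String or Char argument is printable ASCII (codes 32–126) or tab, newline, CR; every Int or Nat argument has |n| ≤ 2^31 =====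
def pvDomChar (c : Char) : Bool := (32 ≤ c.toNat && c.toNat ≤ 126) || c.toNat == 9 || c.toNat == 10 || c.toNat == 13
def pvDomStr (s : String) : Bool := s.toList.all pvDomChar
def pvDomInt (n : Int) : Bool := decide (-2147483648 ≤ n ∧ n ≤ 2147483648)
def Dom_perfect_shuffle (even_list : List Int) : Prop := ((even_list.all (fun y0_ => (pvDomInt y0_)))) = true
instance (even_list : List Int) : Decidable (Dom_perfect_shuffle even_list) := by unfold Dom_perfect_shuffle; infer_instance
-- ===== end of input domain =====

-- B builds the output position-by-position from a closed-form index map (no splitting, no per-pair append loop); return values proved equal on all inputs.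

-- ===== PORT A =====
def perfect_shuffle (even_list : List Int) : List Int :=
  let split1 := PySem.List.slice even_list (some 0)
      (some (PySem.Int.truncdiv (even_list.length : Int) 2))
  let split2 := PySem.List.slice even_list
      (some (PySem.Int.truncdiv (even_list.length : Int) 2)) none
  (PySem.List.pyRange 0 (split1.length : Int) 1).foldl
    (fun new_list i =>
      (new_list ++ [PySem.List.pyGetD split1 i 0]) ++ [PySem.List.pyGetD split2 i 0]) []

-- ===== PORT B =====
def perfect_shuffle_alt (even_list : List Int) : List Int :=
  let h : Int := PySem.Int.floordiv (even_list.length : Int) 2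
  (PySem.List.pyRange 0 (2 * h) 1).map
    (fun k => PySem.List.pyGetD even_list
      (PySem.Int.mod k 2 * h + PySem.Int.floordiv k 2) 0)

-- ===== PRECONDITION & SPEC =====
def Spec_perfect_shuffle (even_list : List Int) (out : List Int) : Prop := out = perfect_shuffle_alt even_list
instance (even_list : List Int) (out : List Int) : Decidable (Spec_perfect_shuffle even_list out) := by unfold Spec_perfect_shuffle; infer_instance

-- ===== CLAIM (what is proved, stated in full; the proofs are below) =====
def Claim_equal_perfect_shuffle : Prop := ∀ (even_list : List Int), Dom_perfect_shuffle even_list → Spec_perfect_shuffle even_list (perfect_shuffle even_list)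

-- ===== LEMMAS AND PROOFS =====

-- A's loop over i = j, …, H-1 (appending the i-th element of each half) produces the same list
-- as B's index-map comprehension over output positions k = 2j, …, 2H-1.
theorem shuffle_loop (xs : List Int) (H : Nat) (hH : 2 * H ≤ xs.length) :
    ∀ (m j : Nat) (acc : List Int), H - j ≤ m →
    (PySem.List.pyRange (j : Int) (H : Int) 1).foldl
      (fun a i => (a ++ [PySem.List.pyGetD (xs.take H) i 0])
                     ++ [PySem.List.pyGetD (xs.drop H) i 0]) acc
    = acc ++ (PySem.List.pyRange (2 * (j : Int)) (2 * (H : Int)) 1).map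
        (fun k => PySem.List.pyGetD xs
          (PySem.Int.mod k 2 * (H : Int) + PySem.Int.floordiv k 2) 0) := by
  intro m
  induction m with
  | zero =>
      intro j acc hm
      have hj : H ≤ j := by omega
      rw [PySem.List.pyRange_one_eq_nil (by exact_mod_cast hj),
          PySem.List.pyRange_one_eq_nil (by
            have : (H : Int) ≤ (j : Int) := by exact_mod_cast hj
            omega)]
      simp
  | succ m ih =>
      intro j acc hm
      by_cases hj : j < H
      · have hjI : (j : Int) < (H : Int) := by exact_mod_cast hj
        rw [PySem.List.pyRange_one_cons hjI]
        simp only [List.foldl_cons]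
        have hstep : ((j : Int) + 1) = ((j + 1 : Nat) : Int) := by push_cast; ring
        rw [hstep, ih (j + 1) _ (by omega)]
        -- unfold the first two elements of the output range
        rw [PySem.List.pyRange_one_cons (a := 2 * (j : Int)) (by omega),
            PySem.List.pyRange_one_cons (a := 2 * (j : Int) + 1) (by omega)]
        have hrange : (2 * (j : Int) + 1 + 1) = 2 * ((j + 1 : Nat) : Int) := by push_cast; ring
        rw [hrange]
        -- evaluate the index map at k = 2j and k = 2j+1
        have hmod0 : PySem.Int.mod (2 * (j : Int)) 2 = 0 := by
          rw [PySem.Int.mod_eq_emod_of_pos (by norm_num)]; omega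
        have hdiv0 : PySem.Int.floordiv (2 * (j : Int)) 2 = (j : Int) := by
          rw [PySem.Int.floordiv_eq_ediv_of_pos (by norm_num)]; omega
        have hmod1 : PySem.Int.mod (2 * (j : Int) + 1) 2 = 1 := by
          rw [PySem.Int.mod_eq_emod_of_pos (by norm_num)]; omega
        have hdiv1 : PySem.Int.floordiv (2 * (j : Int) + 1) 2 = (j : Int) := by
          rw [PySem.Int.floordiv_eq_ediv_of_pos (by norm_num)]; omega
        simp only [List.map_cons, hmod0, hdiv0, hmod1, hdiv1, zero_mul, one_mul, zero_add]
        have hHj : ((H : Int) + (j : Int)) = ((H + j : Nat) : Int) := by push_cast; ring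
        rw [hHj]
        simp only [PySem.List.pyGetD_natCast]
        have hlen1 : j < (xs.take H).length := by simp; omega
        have hlen2 : j < (xs.drop H).length := by simp; omega
        have hlen3 : j < xs.length := by omega
        have hlen4 : H + j < xs.length := by omega
        rw [List.getD_eq_getElem _ _ hlen1, List.getD_eq_getElem _ _ hlen2,
            List.getD_eq_getElem _ _ hlen3, List.getD_eq_getElem _ _ hlen4]
        simp [List.getElem_take, List.getElem_drop, List.append_assoc]
      · have hj' : H ≤ j := by omega
        rw [PySem.List.pyRange_one_eq_nil (by exact_mod_cast hj'),
            PySem.List.pyRange_one_eq_nil (by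
              have : (H : Int) ≤ (j : Int) := by exact_mod_cast hj'
              omega)]
        simp

-- ===== VERDICT (by name: the statement is the Claim_ definition above) =====
theorem perfect_shuffle_spec : Claim_equal_perfect_shuffle := by
  intro xs _
  show perfect_shuffle xs = perfect_shuffle_alt xs
  unfold perfect_shuffle perfect_shuffle_alt
  dsimp only
  have hdiv : PySem.Int.truncdiv (xs.length : Int) 2 = ((xs.length / 2 : Nat) : Int) := by
    simp [PySem.Int.truncdiv]
  have hfloor : PySem.Int.floordiv (xs.length : Int) 2 = ((xs.length / 2 : Nat) : Int) := by
    exact_mod_cast PySem.Int.floordiv_natCast xs.length 2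
  rw [hdiv, hfloor]
  rw [PySem.List.slice_toNat xs (by norm_num) (by positivity),
      PySem.List.slice_from xs (by positivity)]
  simp only [Int.toNat_natCast, Int.toNat_zero, List.drop_zero, Nat.sub_zero]
  have hlen : (xs.take (xs.length / 2)).length = xs.length / 2 := by
    simp [Nat.min_eq_left (Nat.div_le_self _ _)]
  have hmain := shuffle_loop xs (xs.length / 2) (by omega) (xs.length / 2) 0 [] (by omega)
  simp only [Nat.cast_zero, mul_zero, List.nil_append] at hmain
  rw [hlen, hmain]
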